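-- pv_equiv track=rewrite | github.com/xyzpw/dict-reorder | dict_reorder/__init__.py | swapKeys
-- ===== SOURCE A (Python) =====
-- def swapKeys(dictionary: dict, key: str, targetKey: str) -> dict:
--     """Swaps the keys indexes in a dictionary.
--
--     :param dictionary: the dictionary to edit
--     :param key: the key to be swapped
--     :param targetKey: the key with which `key` will be swapped
--     """
--     keys = list(dictionary)
--     currentIndex = keys.index(key)
--     targetIndex = keys.index(targetKey)
--     keys[targetIndex] = key
--     keys[currentIndex] = targetKey
--     newDictionary = {k: dictionary[k] for k in keys}
--     return newDictionary
-- ===== SOURCE B (Python) =====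
-- def swapKeys(dictionary: dict, key: str, targetKey: str) -> dict:
--     """Swap the positions of `key` and `targetKey` in one pass over the dict."""
--     if key not in dictionary or targetKey not in dictionary:
--         raise ValueError("key not found")
--     vk = dictionary[key]
--     vt = dictionary[targetKey]
--     newDictionary = {}
--     for k, v in dictionary.items():
--         if k == key:
--             newDictionary[targetKey] = vt
--         elif k == targetKey:
--             newDictionary[key] = vk
--         else:
--             newDictionary[k] = v
--     return newDictionary
-- ===== Notes on version B (the rewrite author's own statement) =====
-- stated objective: alternative
-- what changed: B replaces A's key-list with two list.index scans, two positional writes and a rebuild-by-lookup dict comprehension by a single pass over the dict items that emits the swapped entry in place, after one up-front membership check.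
import Mathlib
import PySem

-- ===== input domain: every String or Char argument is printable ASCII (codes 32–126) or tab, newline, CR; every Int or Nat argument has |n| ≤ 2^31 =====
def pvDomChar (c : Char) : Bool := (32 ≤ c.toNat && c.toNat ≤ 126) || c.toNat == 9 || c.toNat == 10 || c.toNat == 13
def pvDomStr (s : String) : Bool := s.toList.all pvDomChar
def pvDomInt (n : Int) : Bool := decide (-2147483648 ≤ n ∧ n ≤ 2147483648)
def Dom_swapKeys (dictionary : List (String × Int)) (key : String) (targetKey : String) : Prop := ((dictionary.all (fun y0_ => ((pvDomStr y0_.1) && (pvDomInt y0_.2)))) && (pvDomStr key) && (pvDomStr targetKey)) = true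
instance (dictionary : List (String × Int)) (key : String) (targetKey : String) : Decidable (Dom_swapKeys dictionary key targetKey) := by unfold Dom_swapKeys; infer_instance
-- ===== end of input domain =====

-- B swaps the two keys' positions in one pass over the dict, instead of A's key-list
-- with two list.index scans and a rebuild-by-lookup comprehension (objective: alternative).
-- Pre_ also excludes association lists with duplicate keys, where the List (String × Int)
-- encoding of a Python dict is ambiguous (a Python dict collapses duplicates before A runs).

-- ===== PORT A =====
-- dictionary[k] (Python dict lookup, used by both sources); under Pre_ every key looked
-- up is present, so the default 0 is never the result (KeyError only outside Pre_).
def pyDictGet (d : List (String × Int)) (k : String) : Int :=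
  PySem.Dict.getD (PySem.Dict.mk d) k 0

def swapKeys (dictionary : List (String × Int)) (key : String) (targetKey : String) : List (String × Int) :=
  let keys := dictionary.map Prod.fst
  match PySem.List.index? keys key with
  | none => []      -- keys.index(key) raises ValueError (outside Pre_)
  | some currentIndex =>
    match PySem.List.index? keys targetKey with
    | none => []    -- keys.index(targetKey) raises ValueError (outside Pre_)
    | some targetIndex =>
      let keys := (keys.set targetIndex key).set currentIndex targetKey
      -- {k: dictionary[k] for k in keys} : a dict built by inserting in order
      (keys.foldl (fun (out : PySem.Dict String Int) k =>
          out.insert k (pyDictGet dictionary k)) PySem.Dict.empty).items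

-- ===== PORT B =====

def swapKeys_alt (dictionary : List (String × Int)) (key : String) (targetKey : String) : List (String × Int) :=
  if (dictionary.any (fun p => p.1 == key) && dictionary.any (fun p => p.1 == targetKey)) then
    let vk := pyDictGet dictionary key
    let vt := pyDictGet dictionary targetKey
    (dictionary.foldl (fun (out : PySem.Dict String Int) p =>
        if p.1 == key then out.insert targetKey vt
        else if p.1 == targetKey then out.insert key vk
        else out.insert p.1 p.2) PySem.Dict.empty).items
  else []           -- raise ValueError (outside Pre_)

-- ===== PRECONDITION & SPEC =====
-- Pre_: both keys present (else A raises ValueError via list.index), and the association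
-- list has pairwise-distinct keys (a Python dict cannot hold duplicates; on a duplicate-key
-- list the dict argument collapses before A runs, so such lists encode a different dict).
def Pre_swapKeys (dictionary : List (String × Int)) (key : String) (targetKey : String) : Prop :=
  (dictionary.map Prod.fst).Nodup ∧ key ∈ dictionary.map Prod.fst ∧ targetKey ∈ dictionary.map Prod.fst

instance (dictionary : List (String × Int)) (key : String) (targetKey : String) : Decidable (Pre_swapKeys dictionary key targetKey) := by unfold Pre_swapKeys; infer_instance

def pvWitness_swapKeys : (List (String × Int)) × String × String := ([("a", 1), ("b", 2), ("c", 3)], "a", "c")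

def Spec_swapKeys (dictionary : List (String × Int)) (key : String) (targetKey : String) (out : List (String × Int)) : Prop := out = swapKeys_alt dictionary key targetKey
instance (dictionary : List (String × Int)) (key : String) (targetKey : String) (out : List (String × Int)) : Decidable (Spec_swapKeys dictionary key targetKey out) := by unfold Spec_swapKeys; infer_instance

-- ===== CLAIM (what is proved, stated in full; the proofs are below) =====
def Claim_equal_swapKeys : Prop := ∀ (dictionary : List (String × Int)) (key : String) (targetKey : String), Dom_swapKeys dictionary key targetKey → Pre_swapKeys dictionary key targetKey → Spec_swapKeys dictionary key targetKey (swapKeys dictionary key targetKey)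

-- ===== LEMMAS AND PROOFS =====

-- the key-renaming the swap performs, as a function on keys
def swapf (key targetKey k : String) : String :=
  if k = key then targetKey else if k = targetKey then key else k

theorem swapf_invol (key targetKey k : String) :
    swapf key targetKey (swapf key targetKey k) = k := by
  unfold swapf; split_ifs <;> simp_all

theorem swapf_inj (key targetKey : String) : Function.Injective (swapf key targetKey) :=
  Function.LeftInverse.injective (g := swapf key targetKey) (swapf_invol key targetKey)

-- A's doubly-updated key list is the pointwise renaming of the original key list
theorem set_set_eq_map_swapf (keys : List String) (key targetKey : String) (ci ti : Nat)
    (hnd : keys.Nodup)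
    (hci : PySem.List.index? keys key = some ci)
    (hti : PySem.List.index? keys targetKey = some ti) :
    (keys.set ti key).set ci targetKey = keys.map (swapf key targetKey) := by
  obtain ⟨hcilt, hcik, -⟩ := PySem.List.getElem_of_index?_eq_some hci
  obtain ⟨htilt, htik, -⟩ := PySem.List.getElem_of_index?_eq_some hti
  apply List.ext_getElem
  · simp
  · intro i hi1 hi2
    have hil : i < keys.length := by simpa using hi2
    rw [List.getElem_map, List.getElem_set, List.getElem_set]
    by_cases h1 : ci = i
    · subst h1
      rw [if_pos rfl, hcik]
      unfold swapf
      rw [if_pos rfl]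
    · rw [if_neg h1]
      by_cases h2 : ti = i
      · subst h2
        rw [if_pos rfl, htik]
        have hne : targetKey ≠ key := by
          intro h
          apply h1
          exact (hnd.getElem_inj_iff (hi := hcilt) (hj := hil)).mp (by rw [hcik, htik, h])
        unfold swapf
        rw [if_neg hne, if_pos rfl]
      · rw [if_neg h2]
        have hk1 : keys[i] ≠ key := by
          intro h
          exact h1 ((hnd.getElem_inj_iff (hi := hcilt) (hj := hil)).mp (by rw [hcik, h]))
        have hk2 : keys[i] ≠ targetKey := by
          intro h
          exact h2 ((hnd.getElem_inj_iff (hi := htilt) (hj := hil)).mp (by rw [htik, h]))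
        unfold swapf
        rw [if_neg hk1, if_neg hk2]

theorem pyDictGet_mem (d : List (String × Int)) (p : String × Int)
    (hnd : (d.map Prod.fst).Nodup) (hp : p ∈ d) : pyDictGet d p.1 = p.2 := by
  unfold pyDictGet
  have h : (PySem.Dict.mk d).get? p.1 = some p.2 := by
    apply PySem.Dict.get?_of_mem_items (d := PySem.Dict.mk d)
    · exact hp
    · rw [PySem.Dict.keys_mk]; exact hnd
  exact PySem.Dict.getD_of_get?_eq_some _ _ h

theorem swapKeys_spec : Claim_equal_swapKeys := by
  intro d key targetKey _ hpre
  obtain ⟨hnd, hk, ht⟩ := hpre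
  unfold Spec_swapKeys swapKeys swapKeys_alt
  -- both index? calls succeed
  obtain ⟨ci, hci⟩ := Option.isSome_iff_exists.mp ((PySem.List.index?_isSome_iff _ _).mpr hk)
  obtain ⟨ti, hti⟩ := Option.isSome_iff_exists.mp ((PySem.List.index?_isSome_iff _ _).mpr ht)
  dsimp only
  rw [hci, hti]
  -- B's membership guard holds
  have hany : (d.any (fun p => p.1 == key) && d.any (fun p => p.1 == targetKey)) = true := by
    simp only [List.mem_map] at hk ht
    obtain ⟨p1, hp1, he1⟩ := hk
    obtain ⟨p2, hp2, he2⟩ := ht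
    simp only [Bool.and_eq_true, List.any_eq_true]
    exact ⟨⟨p1, hp1, by simp [he1]⟩, ⟨p2, hp2, by simp [he2]⟩⟩
  rw [if_pos hany]
  -- rewrite both dict-building folds as appends of fresh distinct keys
  have hA := PySem.Dict.items_foldl_insert_fresh
      (l := ((d.map Prod.fst).set ti key).set ci targetKey)
      (k := fun k => k) (v := fun k => pyDictGet d k) (d := PySem.Dict.empty)
      (by intro a _; exact PySem.Dict.contains_empty a)
      (by rw [List.map_id']
          rw [set_set_eq_map_swapf _ _ _ _ _ hnd hci hti]
          exact hnd.map (swapf_inj key targetKey))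
  have hBfun : (fun (out : PySem.Dict String Int) (p : String × Int) =>
        if p.1 == key then out.insert targetKey (pyDictGet d targetKey)
        else if p.1 == targetKey then out.insert key (pyDictGet d key)
        else out.insert p.1 p.2)
      = fun (out : PySem.Dict String Int) (p : String × Int) =>
        out.insert (swapf key targetKey p.1)
          (if p.1 = key then pyDictGet d targetKey else if p.1 = targetKey then pyDictGet d key else p.2) := by
    funext out p
    unfold swapf
    split_ifs with h1 h2 <;> simp_all
  have hB := PySem.Dict.items_foldl_insert_fresh
      (l := d)
      (k := fun p => swapf key targetKey p.1)
      (v := fun p => if p.1 = key then pyDictGet d targetKey else if p.1 = targetKey then pyDictGet d key else p.2)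
      (d := PySem.Dict.empty)
      (by intro a _; exact PySem.Dict.contains_empty _)
      (by have h := hnd.map (swapf_inj key targetKey)
          rw [List.map_map] at h
          simpa [Function.comp] using h)
  simp only [hBfun]
  rw [hA, hB]
  rw [set_set_eq_map_swapf _ _ _ _ _ hnd hci hti]
  rw [List.map_map, List.map_map]
  congr 1
  apply List.map_congr_left
  intro p hp
  simp only [Function.comp]
  by_cases h1 : p.1 = key
  · simp [swapf, h1, pyDictGet, pyDictGet]
  · by_cases h2 : p.1 = targetKey
    · have hne : targetKey ≠ key := fun h => h1 (h2.trans h)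
      simp [swapf, h2, hne, pyDictGet, pyDictGet]
    · simp only [swapf, if_neg h1, if_neg h2]
      rw [pyDictGet_mem d p hnd hp]
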